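-- pv_equiv track=rewrite | github.com/Larkooo/nums-ai | src/fetch_player_games.py | unpack_powers
-- ===== SOURCE A (Python) =====
-- from typing import Any
--
-- PACKED_BASE = 16
--
-- def parse_int(value: Any) -> int:
--     if isinstance(value, bool):
--         return int(value)
--     if isinstance(value, int):
--         return value
--     if isinstance(value, str):
--         return int(value, 16) if value.startswith("0x") else int(value)
--     return 0
--
-- def unpack_powers(packed: Any) -> list[int]:
--     value = parse_int(packed)
--     powers = []
--     while value > 0:
--         power = value % PACKED_BASE
--         if power != 0:
--             powers.append(power)
--         value //= PACKED_BASE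
--     return powers
-- ===== SOURCE B (Python) =====
-- from typing import Any
--
-- PACKED_BASE = 16
--
-- def parse_int(value: Any) -> int:
--     if isinstance(value, bool):
--         return int(value)
--     if isinstance(value, int):
--         return value
--     if isinstance(value, str):
--         return int(value, 16) if value.startswith("0x") else int(value)
--     return 0
--
-- def unpack_powers(packed: Any) -> list[int]:
--     value = parse_int(packed)
--     if value <= 0:
--         return []
--     # hex string, least-significant digit first; keep the nonzero digits
--     return [int(ch, 16) for ch in format(value, "x")[::-1] if int(ch, 16) != 0]
-- ===== Notes on version B (the rewrite author's own statement) =====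
-- stated objective: idiomatic
-- what changed: Replaces the modulo/floor-division extraction loop with a single hex-string conversion (format(value,'x')) scanned in reverse, converting each character back with int(ch,16) and keeping nonzero digits.
import Mathlib
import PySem

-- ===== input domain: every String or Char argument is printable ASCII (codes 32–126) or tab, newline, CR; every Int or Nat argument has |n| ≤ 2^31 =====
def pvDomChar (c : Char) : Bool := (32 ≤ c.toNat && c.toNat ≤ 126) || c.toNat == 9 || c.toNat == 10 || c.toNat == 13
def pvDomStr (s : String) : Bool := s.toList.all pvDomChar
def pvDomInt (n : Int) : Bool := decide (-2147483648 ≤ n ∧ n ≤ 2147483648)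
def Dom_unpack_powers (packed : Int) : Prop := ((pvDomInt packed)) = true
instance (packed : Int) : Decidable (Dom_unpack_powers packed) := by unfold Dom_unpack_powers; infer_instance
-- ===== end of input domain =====

-- B replaces A's digit-extraction loop by a hex-string conversion scanned least-significant-first (idiomatic); same return value.
-- Note: under the type convention 'packed' is an Int, on which Python's parse_int is the identity, so both ports start from 'packed' directly.

-- ===== PORT A =====
-- while value > 0: power = value % 16; if power != 0: powers.append(power); value //= 16
def unpack_powers_go (value : Int) (powers : List Int) : List Int :=
  if _h : value > 0 then
    let power := PySem.Int.mod value 16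
    unpack_powers_go (PySem.Int.floordiv value 16)
      (if power ≠ 0 then powers ++ [power] else powers)
  else powers
termination_by value.toNat
decreasing_by
  simp only [PySem.Int.floordiv_eq_ediv_of_pos (by norm_num : (0:Int) < 16)]
  omega

def unpack_powers (packed : Int) : List Int :=
  unpack_powers_go packed []

-- ===== PORT B =====
-- hex digit alphabet used by format(value, 'x')
def pvHexDigitChar (d : Nat) : Char :=
  "0123456789abcdef".toList.getD d '0'

-- hand port of format(n, 'x') for a positive n (exact there: no sign, most-significant digit first)
def pvFormatHex (n : Nat) : List Char :=
  if n < 16 then [pvHexDigitChar n]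
  else pvFormatHex (n / 16) ++ [pvHexDigitChar (n % 16)]

-- int(ch, 16); the characters scanned always come from pvFormatHex, where the parse never fails
def pvIntOfHexChar (c : Char) : Int :=
  (PySem.Int.ofCharsBase? [c] 16).getD 0

def unpack_powers_alt (packed : Int) : List Int :=
  if packed ≤ 0 then []
  else ((pvFormatHex packed.toNat).reverse.map pvIntOfHexChar).filter (fun d => d ≠ 0)

-- ===== PRECONDITION & SPEC =====
def Spec_unpack_powers (packed : Int) (out : List Int) : Prop := out = unpack_powers_alt packed
instance (packed : Int) (out : List Int) : Decidable (Spec_unpack_powers packed out) := by unfold Spec_unpack_powers; infer_instance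

-- ===== CLAIM (what is proved, stated in full; the proofs are below) =====
def Claim_equal_unpack_powers : Prop := ∀ (packed : Int), Dom_unpack_powers packed → Spec_unpack_powers packed (unpack_powers packed)

-- ===== LEMMAS AND PROOFS =====

-- base-16 digits of n, least significant first (proof-only reference list)
def pvDigits (n : Nat) : List Nat :=
  if n = 0 then [] else n % 16 :: pvDigits (n / 16)
decreasing_by omega

theorem pvHexRound (d : Nat) (h : d < 16) :
    pvIntOfHexChar (pvHexDigitChar d) = (d : Int) := by
  interval_cases d <;> decide

theorem pvFormatHex_reverse (n : Nat) (hn : 0 < n) :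
    ((pvFormatHex n).reverse.map pvIntOfHexChar) = (pvDigits n).map (fun d : Nat => (d : Int)) := by
  induction n using Nat.strong_induction_on with
  | _ n ih =>
    rw [pvFormatHex, pvDigits]
    by_cases h : n < 16
    · have h0 : n / 16 = 0 := by omega
      rw [if_pos h, if_neg (by omega : ¬ n = 0), h0, pvDigits]
      simp [pvHexRound n h, Nat.mod_eq_of_lt h]
    · simp only [if_neg h, if_neg (by omega : ¬ n = 0)]
      rw [List.reverse_append]
      simp only [List.reverse_singleton, List.singleton_append, List.map_cons]
      rw [ih (n / 16) (by omega) (by omega), pvHexRound (n % 16) (by omega)]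

theorem unpack_powers_go_eq (n : Nat) (acc : List Int) :
    unpack_powers_go (n : Int) acc
      = acc ++ ((pvDigits n).map (fun d : Nat => (d : Int))).filter (fun d => d ≠ 0) := by
  induction n using Nat.strong_induction_on generalizing acc with
  | _ n ih =>
    rw [unpack_powers_go, pvDigits]
    by_cases h : n = 0
    · rw [dif_neg (by omega : ¬ ((n:Int) > 0)), if_pos h]
      simp only [List.map_nil, List.filter_nil, List.append_nil]
    · have hmod : PySem.Int.mod (n : Int) 16 = ((n % 16 : Nat) : Int) := by
        rw [PySem.Int.mod_eq_emod_of_pos (by norm_num)]; push_cast; rfl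
      have hdiv : PySem.Int.floordiv (n : Int) 16 = ((n / 16 : Nat) : Int) := by
        rw [PySem.Int.floordiv_eq_ediv_of_pos (by norm_num)]; push_cast; rfl
      rw [dif_pos (by omega : (n:Int) > 0)]
      show unpack_powers_go (PySem.Int.floordiv (n:Int) 16)
          (if PySem.Int.mod (n:Int) 16 ≠ 0 then acc ++ [PySem.Int.mod (n:Int) 16] else acc) = _
      rw [hmod, hdiv, ih (n / 16) (by omega), if_neg h, List.map_cons, List.filter_cons]
      by_cases hz : ((n % 16 : Nat) : Int) = 0
      · rw [if_neg (by simpa using hz)]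
        simp only [hz, ne_eq, not_true_eq_false, decide_false,
          Bool.false_eq_true, if_false]
      · rw [if_pos hz]
        simp only [ne_eq, hz, not_false_eq_true, decide_true, if_true, List.append_assoc,
          List.singleton_append]

theorem unpack_powers_eq (packed : Int) :
    unpack_powers packed = unpack_powers_alt packed := by
  unfold unpack_powers unpack_powers_alt
  by_cases h : packed ≤ 0
  · rw [unpack_powers_go, dif_neg (by omega : ¬ packed > 0), if_pos h]
  · have hp : (packed.toNat : Int) = packed := by omega
    rw [if_neg h]
    conv_lhs => rw [← hp]
    rw [unpack_powers_go_eq, pvFormatHex_reverse packed.toNat (by omega), List.nil_append]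

-- ===== VERDICT (by name: the statement is the Claim_ definition above) =====
theorem unpack_powers_spec : Claim_equal_unpack_powers := by
  intro packed _
  exact unpack_powers_eq packed
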